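-- pv_equiv track=rewrite | github.com/Kodis0/ReferalSystem | backend/referrals/site_archive.py | normalize_origin_tuple
-- ===== SOURCE A (Python) =====
-- from typing import Iterable, Optional
--
-- def normalize_origin_tuple(origins: Iterable[str]) -> tuple[str, ...]:
--     """Comparable tuple for allowed_origins equality (trim, lowercase host/path normalization light)."""
--     seen: set[str] = set()
--     out: list[str] = []
--     for raw in origins:
--         s = (raw or "").strip().rstrip("/")
--         if not s:
--             continue
--         low = s.lower()
--         if low not in seen:
--             seen.add(low)
--             out.append(low)
--     return tuple(sorted(out))
-- ===== SOURCE B (Python) =====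
-- def normalize_origin_tuple(origins):
--     vals = []
--     for raw in origins:
--         s = (raw or "").strip().rstrip("/")
--         if s:
--             vals.append(s.lower())
--     vals.sort()
--     out = []
--     for v in vals:
--         if not out or out[-1] != v:
--             out.append(v)
--     return tuple(out)
-- ===== Notes on version B (the rewrite author's own statement) =====
-- stated objective: alternative
-- what changed: Replaces the maintained hash-set (dedup-before-sort) with collect-all-normalized-values, sort, then a single adjacency pass that drops equal neighbours (dedup-after-sort); no 'seen' set exists.
import Mathlib
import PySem

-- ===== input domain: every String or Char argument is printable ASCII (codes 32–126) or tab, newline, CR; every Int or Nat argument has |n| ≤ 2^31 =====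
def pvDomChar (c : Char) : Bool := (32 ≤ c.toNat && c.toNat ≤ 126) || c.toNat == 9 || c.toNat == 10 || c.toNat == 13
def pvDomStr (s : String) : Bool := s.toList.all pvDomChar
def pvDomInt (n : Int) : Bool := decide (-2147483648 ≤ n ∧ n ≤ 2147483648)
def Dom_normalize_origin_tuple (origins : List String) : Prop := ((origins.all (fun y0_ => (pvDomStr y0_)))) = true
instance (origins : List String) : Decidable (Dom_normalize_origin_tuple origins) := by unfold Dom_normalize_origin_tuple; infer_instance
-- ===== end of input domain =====

set_option maxHeartbeats 400000


-- B replaces A's hash-set dedup-before-sort with sort-then-adjacent-dedup (no 'seen' set); alternative algorithm, same cost.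

-- shared normalization: (raw or "").strip().rstrip("/")  ('raw or ""' = raw for strings;
-- rstrip("/") ported by hand as reverse/dropWhile '/'/reverse — exact: Python drops exactly the trailing run of '/')
def pvNorm (raw : String) : String :=
  String.ofList (((PySem.Str.strip raw).toList.reverse.dropWhile (fun c => c == '/')).reverse)

-- ===== PORT A =====
-- loop body of A's 'for raw in origins' (state: the 'seen' set and the 'out' list)
def pvAStep (acc : PySem.Set String × List String) (raw : String) : PySem.Set String × List String :=
  let s := pvNorm raw
  if s = "" then acc
  else
    let low := PySem.Str.lower s
    if PySem.Set.contains acc.1 low then acc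
    else (PySem.Set.add acc.1 low, acc.2 ++ [low])

def normalize_origin_tuple (origins : List String) : List String :=
  PySem.List.sorted (origins.foldl pvAStep (PySem.Set.empty, [])).2 (fun x => x) false

-- ===== PORT B =====
-- loop body of B's first loop (collect normalized lowered non-empty values)
def pvBStep (acc : List String) (raw : String) : List String :=
  let s := pvNorm raw
  if s = "" then acc else acc ++ [PySem.Str.lower s]

-- loop body of B's adjacency-dedup pass: 'if not out or out[-1] != v: out.append(v)'
def pvDStep (out : List String) (v : String) : List String :=
  if out = [] ∨ ¬ (out.getLast? = some v) then out ++ [v] else out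

def normalize_origin_tuple_alt (origins : List String) : List String :=
  let vals := origins.foldl pvBStep []
  let ws := PySem.List.sorted vals (fun x => x) false
  ws.foldl pvDStep []

-- ===== PRECONDITION & SPEC =====
def Spec_normalize_origin_tuple (origins : List String) (out : List String) : Prop := out = normalize_origin_tuple_alt origins
instance (origins : List String) (out : List String) : Decidable (Spec_normalize_origin_tuple origins out) := by unfold Spec_normalize_origin_tuple; infer_instance

-- ===== CLAIM (what is proved, stated in full; the proofs are below) =====
def Claim_equal_normalize_origin_tuple : Prop := ∀ (origins : List String), Dom_normalize_origin_tuple origins → Spec_normalize_origin_tuple origins (normalize_origin_tuple origins)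

-- ===== LEMMAS AND PROOFS =====

-- the multiset of normalized lowered non-empty values, as a filterMap
def pvVals (l : List String) : List String :=
  l.filterMap (fun raw => if pvNorm raw = "" then none else some (PySem.Str.lower (pvNorm raw)))

lemma pvVals_cons_pos {raw : String} (t : List String) (h : pvNorm raw = "") :
    pvVals (raw :: t) = pvVals t := by
  simp [pvVals, h]

lemma pvVals_cons_neg {raw : String} (t : List String) (h : ¬ pvNorm raw = "") :
    pvVals (raw :: t) = PySem.Str.lower (pvNorm raw) :: pvVals t := by
  simp [pvVals, h]

lemma bvals_eq (l : List String) (acc : List String) :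
    l.foldl pvBStep acc = acc ++ pvVals l := by
  induction l generalizing acc with
  | nil => simp [pvVals]
  | cons raw t ih =>
    by_cases h : pvNorm raw = ""
    · rw [List.foldl_cons, show pvBStep acc raw = acc from by simp [pvBStep, h], ih, pvVals_cons_pos t h]
    · rw [List.foldl_cons, show pvBStep acc raw = acc ++ [PySem.Str.lower (pvNorm raw)] from by simp [pvBStep, h],
        ih, pvVals_cons_neg t h]
      simp

lemma afold_spec (l : List String) (seen out : List String)
    (hinv : ∀ x, x ∈ seen ↔ x ∈ out) (hnd : out.Nodup) :
    (l.foldl pvAStep (seen, out)).2.Nodup ∧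
    (∀ x, x ∈ (l.foldl pvAStep (seen, out)).2 ↔ x ∈ out ∨ x ∈ pvVals l) := by
  induction l generalizing seen out with
  | nil => exact ⟨hnd, fun x => by simp [pvVals]⟩
  | cons raw t ih =>
    simp only [List.foldl_cons]
    by_cases h : pvNorm raw = ""
    · rw [show pvAStep (seen, out) raw = (seen, out) from by simp [pvAStep, h]]
      have := ih seen out hinv hnd
      refine ⟨this.1, fun x => ?_⟩
      rw [this.2 x, pvVals_cons_pos t h]
    · by_cases hc : PySem.Str.lower (pvNorm raw) ∈ seen
      · rw [show pvAStep (seen, out) raw = (seen, out) from by simp [pvAStep, h, hc]]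
        have hmem : PySem.Str.lower (pvNorm raw) ∈ out := (hinv _).mp hc
        have := ih seen out hinv hnd
        refine ⟨this.1, fun x => ?_⟩
        rw [this.2 x, pvVals_cons_neg t h]
        simp only [List.mem_cons]
        constructor
        · rintro (hx | hx)
          · exact Or.inl hx
          · exact Or.inr (Or.inr hx)
        · rintro (hx | rfl | hx)
          · exact Or.inl hx
          · exact Or.inl hmem
          · exact Or.inr hx
      · rw [show pvAStep (seen, out) raw
            = (PySem.Set.add seen (PySem.Str.lower (pvNorm raw)), out ++ [PySem.Str.lower (pvNorm raw)]) from by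
          simp [pvAStep, h, hc]]
        -- low is new: it is appended to both components
        have hnm : PySem.Str.lower (pvNorm raw) ∉ out := fun hm => hc ((hinv _).mpr hm)
        have hinv' : ∀ x, x ∈ PySem.Set.add seen (PySem.Str.lower (pvNorm raw)) ↔
            x ∈ out ++ [PySem.Str.lower (pvNorm raw)] := by
          intro x
          rw [PySem.Set.mem_add]
          simp only [List.mem_append, List.mem_singleton, hinv x]
        have hnd' : (out ++ [PySem.Str.lower (pvNorm raw)]).Nodup :=
          hnd.append (List.nodup_singleton _) (List.disjoint_singleton.mpr hnm)
        have := ih _ _ hinv' hnd'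
        refine ⟨this.1, fun x => ?_⟩
        rw [this.2 x, pvVals_cons_neg t h]
        simp only [List.mem_append, List.mem_cons, List.not_mem_nil, or_false]
        exact or_assoc

lemma pairwise_le_getLast {out : List String} (h : out.Pairwise (· < ·)) {m : String}
    (hm : out.getLast? = some m) : ∀ x ∈ out, x ≤ m := by
  induction out with
  | nil => simp at hm
  | cons a t ih =>
    intro x hx
    cases t with
    | nil =>
      simp at hm hx
      simp [hx, hm]
    | cons b u =>
      rw [List.getLast?_cons_cons] at hm
      rcases List.mem_cons.mp hx with rfl | hx
      · have hm' : m ∈ b :: u := List.mem_of_getLast? hm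
        exact le_of_lt ((List.pairwise_cons.mp h).1 m hm')
      · exact ih (List.pairwise_cons.mp h).2 hm x hx

lemma dedup_loop (ws : List String) (out : List String)
    (h1 : out.Pairwise (· < ·)) (h2 : ws.Pairwise (· ≤ ·))
    (h3 : ∀ m, out.getLast? = some m → ∀ w ∈ ws, m ≤ w) :
    (ws.foldl pvDStep out).Pairwise (· < ·) ∧
    (∀ x, x ∈ ws.foldl pvDStep out ↔ x ∈ out ∨ x ∈ ws) := by
  induction ws generalizing out with
  | nil => exact ⟨h1, fun x => by simp⟩
  | cons w t ih =>
    obtain ⟨hw, ht⟩ := List.pairwise_cons.mp h2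
    simp only [List.foldl_cons]
    by_cases hcond : out = [] ∨ ¬ (out.getLast? = some w)
    · -- append w
      have hlt : ∀ x ∈ out, x < w := by
        intro x hx
        cases hout : out.getLast? with
        | none => simp [List.getLast?_eq_none_iff.mp hout] at hx
        | some m =>
          have hm : m ≤ w := h3 m hout w (List.mem_cons_self ..)
          have hne : m ≠ w := by
            rcases hcond with hnil | hne
            · simp [hnil] at hout
            · intro he; exact hne (he ▸ hout)
          exact lt_of_le_of_lt (pairwise_le_getLast h1 hout x hx) (lt_of_le_of_ne hm hne)
      have h1' : (out ++ [w]).Pairwise (· < ·) := by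
        rw [List.pairwise_append]
        exact ⟨h1, List.pairwise_singleton _ _, fun x hx y hy => (List.mem_singleton.mp hy) ▸ hlt x hx⟩
      have h3' : ∀ m, (out ++ [w]).getLast? = some m → ∀ r ∈ t, m ≤ r := by
        intro m hm r hr
        simp [List.getLast?_append] at hm
        exact hm ▸ hw r hr
      have := ih (out ++ [w]) h1' ht h3'
      rw [show pvDStep out w = out ++ [w] by simp [pvDStep, hcond]]
      refine ⟨this.1, fun x => ?_⟩
      rw [this.2 x]
      simp only [List.mem_append, List.mem_cons, List.not_mem_nil, or_false]
      exact or_assoc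
    · -- skip: out nonempty with last = w
      rw [not_or, not_not] at hcond
      obtain ⟨hne, hlast⟩ := hcond
      have hwmem : w ∈ out := List.mem_of_getLast? hlast
      have h3' : ∀ m, out.getLast? = some m → ∀ r ∈ t, m ≤ r := by
        intro m hm r hr
        rw [hlast] at hm
        exact (Option.some_inj.mp hm) ▸ hw r hr
      have := ih out h1 ht h3'
      rw [show pvDStep out w = out by simp [pvDStep, hne, hlast]]
      refine ⟨this.1, fun x => ?_⟩
      rw [this.2 x]
      simp only [List.mem_cons]
      constructor
      · rintro (hx | hx)
        · exact Or.inl hx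
        · exact Or.inr (Or.inr hx)
      · rintro (hx | rfl | hx)
        · exact Or.inl hx
        · exact Or.inl hwmem
        · exact Or.inr hx

-- ===== VERDICT (by name: the statement is the Claim_ definition above) =====
theorem normalize_origin_tuple_spec : Claim_equal_normalize_origin_tuple := by
  intro origins _
  unfold Spec_normalize_origin_tuple
  simp only [normalize_origin_tuple, normalize_origin_tuple_alt]
  have hA := afold_spec origins PySem.Set.empty [] (by intro x; simp [PySem.Set.empty]) List.nodup_nil
  rw [bvals_eq origins []]
  simp only [List.nil_append]
  have hwsle : (PySem.List.sorted (pvVals origins) (fun x : String => x) false).Pairwise (· ≤ ·) :=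
    PySem.List.sorted_pairwise (pvVals origins) (fun x => x)
  have hB := dedup_loop (PySem.List.sorted (pvVals origins) (fun x : String => x) false) []
    List.Pairwise.nil hwsle (by intro m hm; simp at hm)
  have hznd : ((PySem.List.sorted (pvVals origins) (fun x : String => x) false).foldl pvDStep []).Nodup :=
    hB.1.imp (fun h => ne_of_lt h)
  have hzmem : ∀ x, x ∈ (PySem.List.sorted (pvVals origins) (fun x : String => x) false).foldl pvDStep [] ↔
      x ∈ (origins.foldl pvAStep (PySem.Set.empty, [])).2 := by
    intro x
    rw [hB.2 x, (hA.2 x)]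
    simp [PySem.List.mem_sorted]
  have hperm : ((PySem.List.sorted (pvVals origins) (fun x : String => x) false).foldl pvDStep []).Perm
      (origins.foldl pvAStep (PySem.Set.empty, [])).2 :=
    (List.perm_ext_iff_of_nodup hznd hA.1).mpr hzmem
  exact PySem.List.sorted_eq_of_perm_of_pairwise_lt _ _ (fun x : String => x) hperm hB.1
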